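-- pv_equiv track=rewrite | github.com/letkh/Informatika23-24 | 17.01.2024/283 variant/25.py | f
-- ===== SOURCE A (Python) =====
-- def f(x):
--     count = 0
--     sum_d = 0
--     for d in range(1, x + 1):
--         if x % d == 0:
--             if d % 2 == 0:
--                 count += 1
--                 sum_d += d
--     return count, sum_d
-- ===== SOURCE B (Python) =====
-- def f(x):
--     # Enumerate divisors only up to sqrt(x), pairing each small divisor d
--     # with its complement x // d; filter even ones. O(sqrt(x)) vs A's O(x).
--     count = 0
--     total = 0
--     d = 1
--     while d * d <= x:
--         if x % d == 0:
--             if d % 2 == 0: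
--                 count += 1
--                 total += d
--             q = x // d
--             if q != d and q % 2 == 0:
--                 count += 1
--                 total += q
--         d += 1
--     return count, total
-- ===== Notes on version B (the rewrite author's own statement) =====
-- stated objective: faster
-- what changed: B enumerates candidate divisors only up to sqrt(x), pairing each small divisor d with its complement x//d and filtering even ones, instead of A's trial division over the whole range 1..x.
import Mathlib
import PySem

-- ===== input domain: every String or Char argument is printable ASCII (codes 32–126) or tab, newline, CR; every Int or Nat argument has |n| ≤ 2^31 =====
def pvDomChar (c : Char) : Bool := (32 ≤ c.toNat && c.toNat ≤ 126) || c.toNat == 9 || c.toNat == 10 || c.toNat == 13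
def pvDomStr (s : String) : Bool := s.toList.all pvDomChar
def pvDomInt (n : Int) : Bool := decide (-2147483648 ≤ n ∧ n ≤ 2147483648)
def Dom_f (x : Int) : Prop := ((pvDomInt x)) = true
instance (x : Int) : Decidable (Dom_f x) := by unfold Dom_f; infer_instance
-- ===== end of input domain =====

-- B replaces A's scan of the whole range 1..x by enumeration of divisors up to √x,
-- pairing each small divisor with its complement x // d; equivalence is proved below.

-- ===== PORT A =====
def f (x : Int) : List Int :=
  let st := (PySem.List.pyRange 1 (x + 1) 1).foldl
    (fun (cs : Int × Int) d =>
      if PySem.Int.mod x d = 0 then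
        if PySem.Int.mod d 2 = 0 then (cs.1 + 1, cs.2 + d) else cs
      else cs) (0, 0)
  [st.1, st.2]

-- ===== PORT B =====
-- Source B's while loop: state (count, total), d counts upward while d*d ≤ x.
-- Fuel x+1 bounds the iteration count (the loop needs at most x steps); it is a
-- totality guard only, never reached while the loop condition holds.
def fAltGo (x : Int) : Nat → Int → Int → Int → Int × Int
  | 0, _, c, s => (c, s)
  | Nat.succ n, d, c, s =>
    if d * d ≤ x then
      if PySem.Int.mod x d = 0 then
        let p := if PySem.Int.mod d 2 = 0 then (c + 1, s + d) else (c, s)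
        let q := PySem.Int.floordiv x d
        if q ≠ d ∧ PySem.Int.mod q 2 = 0 then fAltGo x n (d + 1) (p.1 + 1) (p.2 + q)
        else fAltGo x n (d + 1) p.1 p.2
      else fAltGo x n (d + 1) c s
    else (c, s)

def f_alt (x : Int) : List Int :=
  let st := fAltGo x (x + 1).toNat 1 0 0
  [st.1, st.2]

-- ===== PRECONDITION & SPEC =====
def Spec_f (x : Int) (out : List Int) : Prop := out = f_alt x
instance (x : Int) (out : List Int) : Decidable (Spec_f x out) := by unfold Spec_f; infer_instance

-- ===== CLAIM (what is proved, stated in full; the proofs are below) =====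
def Claim_equal_f : Prop := ∀ (x : Int), Dom_f x → Spec_f x (f x)

-- ===== LEMMAS AND PROOFS =====

-- termination helper for the while loop: d*d ≤ x forces d ≤ x
lemma pv_le_of_sq_le (d x : Int) (h : d * d ≤ x) : d ≤ x := by
  by_cases hd : d ≤ 0
  · linarith [mul_self_nonneg d]
  · have hd1 : 1 ≤ d := by omega
    nlinarith


-- the even divisors of x inside [1, x]  (proof-only helper, not part of either port)
noncomputable def evenDiv (x : Int) : Finset Int :=
  (Finset.Icc 1 x).filter (fun e => x % e = 0 ∧ e % 2 = 0)

-- the divisors of x in [d, x] not exceeding √x  (proof-only helper)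
noncomputable def smallDiv (x d : Int) : Finset Int :=
  (Finset.Icc d x).filter (fun e => e * e ≤ x ∧ x % e = 0)

-- contribution of a small divisor e (itself and its complement x/e) to the count
def cnt (x e : Int) : Int :=
  (if e % 2 = 0 then 1 else 0) + (if x / e ≠ e ∧ (x / e) % 2 = 0 then 1 else 0)

-- contribution of a small divisor e (itself and its complement x/e) to the sum
def vAl (x e : Int) : Int :=
  (if e % 2 = 0 then e else 0) + (if x / e ≠ e ∧ (x / e) % 2 = 0 then x / e else 0)

-- facts about the complement q = x / e of a divisor e of x
lemma compl_facts (x e : Int) (hx : 1 ≤ x) (h1 : 1 ≤ e) (hdvd : x % e = 0) :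
    1 ≤ x / e ∧ x / e ≤ x ∧ x % (x / e) = 0 ∧ (x / e) * e = x ∧ x / (x / e) = e := by
  have hdvd' : e ∣ x := Int.dvd_of_emod_eq_zero hdvd
  have hqe : x / e * e = x := Int.ediv_mul_cancel hdvd'
  have hq1 : 1 ≤ x / e := by nlinarith
  have hqx : x / e ≤ x := by nlinarith
  refine ⟨hq1, hqx, Int.emod_eq_zero_of_dvd ⟨e, hqe.symm⟩, hqe, ?_⟩
  have h5 : x / e * e / (x / e) = e := Int.mul_ediv_cancel_left e (by omega)
  rw [hqe] at h5
  exact h5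

-- A's fold over 1..k accumulates the cardinality and the sum of the even divisors in [1,k]
lemma foldA_eq (x : Int) : ∀ (k : Nat) (c s : Int),
    (PySem.List.pyRange 1 ((k : Int) + 1) 1).foldl
      (fun (cs : Int × Int) d =>
        if PySem.Int.mod x d = 0 then
          if PySem.Int.mod d 2 = 0 then (cs.1 + 1, cs.2 + d) else cs
        else cs) (c, s)
    = (c + (((Finset.Icc 1 (k : Int)).filter (fun e => x % e = 0 ∧ e % 2 = 0)).card : Int),
       s + ((Finset.Icc 1 (k : Int)).filter (fun e => x % e = 0 ∧ e % 2 = 0)).sum id) := by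
  intro k
  induction k with
  | zero =>
    intro c s
    rw [PySem.List.pyRange_one_eq_nil (by norm_num)]
    simp
  | succ k ih =>
    intro c s
    have hsplit : PySem.List.pyRange 1 (((k : Int) + 1) + 1) 1
        = PySem.List.pyRange 1 ((k : Int) + 1) 1 ++ [(k : Int) + 1] :=
      PySem.List.pyRange_one_succ_right (by omega)
    have hicc : Finset.Icc 1 ((k : Int) + 1)
        = insert ((k : Int) + 1) (Finset.Icc 1 (k : Int)) := by
      ext e
      simp only [Finset.mem_Icc, Finset.mem_insert]
      omega
    have hnotmem : ((k : Int) + 1) ∉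
        (Finset.Icc 1 (k : Int)).filter (fun e => x % e = 0 ∧ e % 2 = 0) := by
      intro hmem
      have h2 := Finset.mem_Icc.mp (Finset.mem_filter.mp hmem).1
      omega
    push_cast
    rw [hsplit, List.foldl_append, ih c s]
    simp only [List.foldl_cons, List.foldl_nil]
    rw [PySem.Int.mod_eq_emod_of_pos (show (0:Int) < (k : Int) + 1 by positivity),
      PySem.Int.mod_eq_emod_of_pos (show (0:Int) < 2 by norm_num), hicc,
      Finset.filter_insert]
    by_cases h1 : x % ((k : Int) + 1) = 0
    · rw [if_pos h1]
      by_cases h2 : ((k : Int) + 1) % 2 = 0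
      · rw [if_pos h2, if_pos ⟨h1, h2⟩, Finset.card_insert_of_notMem hnotmem,
          Finset.sum_insert hnotmem]
        refine Prod.ext ?_ ?_ <;> simp <;> push_cast <;> ring
      · rw [if_neg h2, if_neg (fun h => h2 h.2)]
    · rw [if_neg h1, if_neg (fun h => h1 h.1)]

-- B's loop, run with enough fuel, accumulates the paired contributions of the
-- small divisors ≥ d
lemma fAltGo_eq (x : Int) : ∀ (N : Nat) (d c s : Int), 1 ≤ d → (x + 1 - d).toNat ≤ N →
    fAltGo x N d c s
      = (c + ∑ e ∈ smallDiv x d, cnt x e, s + ∑ e ∈ smallDiv x d, vAl x e) := by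
  intro N
  induction N with
  | zero =>
    intro d c s hd hN
    have hempty : smallDiv x d = ∅ := by
      refine Finset.eq_empty_of_forall_notMem ?_
      intro e hmem
      have h2 := Finset.mem_Icc.mp (Finset.mem_filter.mp hmem).1
      omega
    rw [hempty]
    simp [fAltGo]
  | succ N ih =>
    intro d c s hd hN
    show (if d * d ≤ x then _ else (c, s)) = _
    by_cases h : d * d ≤ x
    · rw [if_pos h]
      have hdx : d ≤ x := pv_le_of_sq_le d x h
      have hx1 : 1 ≤ x := le_trans hd hdx
      have hNle : (x + 1 - (d + 1)).toNat ≤ N := by omega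
      have hnm : d ∉ smallDiv x (d + 1) := by
        intro hmem
        have h2 := Finset.mem_Icc.mp (Finset.mem_filter.mp hmem).1
        omega
      simp only [PySem.Int.mod_eq_emod_of_pos (show (0:Int) < d by omega),
        PySem.Int.mod_eq_emod_of_pos (show (0:Int) < 2 by norm_num),
        PySem.Int.floordiv_eq_ediv_of_pos (show (0:Int) < d by omega)]
      by_cases hxd : x % d = 0
      · rw [if_pos hxd]
        have hins : smallDiv x d = insert d (smallDiv x (d + 1)) := by
          ext e
          simp only [smallDiv, Finset.mem_filter, Finset.mem_Icc, Finset.mem_insert]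
          constructor
          · rintro ⟨⟨he1, he2⟩, he3, he4⟩
            by_cases he : e = d
            · exact Or.inl he
            · exact Or.inr ⟨⟨by omega, he2⟩, he3, he4⟩
          · rintro (he | ⟨⟨he1, he2⟩, he3, he4⟩)
            · rw [he]; exact ⟨⟨le_refl d, hdx⟩, h, hxd⟩
            · exact ⟨⟨by omega, he2⟩, he3, he4⟩
        have hsum1 : ∑ e ∈ smallDiv x d, cnt x e
            = cnt x d + ∑ e ∈ smallDiv x (d + 1), cnt x e := by
          rw [hins, Finset.sum_insert hnm]
        have hsum2 : ∑ e ∈ smallDiv x d, vAl x e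
            = vAl x d + ∑ e ∈ smallDiv x (d + 1), vAl x e := by
          rw [hins, Finset.sum_insert hnm]
        by_cases hc : x / d ≠ d ∧ (x / d) % 2 = 0
        · rw [if_pos hc]
          by_cases h2 : d % 2 = 0
          · rw [if_pos h2, ih (d + 1) _ _ (by omega) hNle, hsum1, hsum2]
            simp only [cnt, vAl, if_pos h2, if_pos hc]
            refine Prod.ext ?_ ?_ <;> simp <;> ring
          · rw [if_neg h2, ih (d + 1) _ _ (by omega) hNle, hsum1, hsum2]
            simp only [cnt, vAl, if_neg h2, if_pos hc]
            refine Prod.ext ?_ ?_ <;> simp <;> ring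
        · rw [if_neg hc]
          by_cases h2 : d % 2 = 0
          · rw [if_pos h2, ih (d + 1) _ _ (by omega) hNle, hsum1, hsum2]
            simp only [cnt, vAl, if_pos h2, if_neg hc]
            refine Prod.ext ?_ ?_ <;> simp <;> ring
          · rw [if_neg h2, ih (d + 1) _ _ (by omega) hNle, hsum1, hsum2]
            simp only [cnt, vAl, if_neg h2, if_neg hc]
            refine Prod.ext ?_ ?_ <;> simp <;> ring
      · rw [if_neg hxd]
        have hins : smallDiv x d = smallDiv x (d + 1) := by
          ext e
          simp only [smallDiv, Finset.mem_filter, Finset.mem_Icc]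
          constructor
          · rintro ⟨⟨he1, he2⟩, he3, he4⟩
            have hne : e ≠ d := fun he => hxd (he ▸ he4)
            exact ⟨⟨by omega, he2⟩, he3, he4⟩
          · rintro ⟨⟨he1, he2⟩, he3, he4⟩
            exact ⟨⟨by omega, he2⟩, he3, he4⟩
        rw [ih (d + 1) _ _ (by omega) hNle, hins]
    · rw [if_neg h]
      have hempty : smallDiv x d = ∅ := by
        refine Finset.eq_empty_of_forall_notMem ?_
        intro e hmem
        obtain ⟨hicc, he3, _⟩ := Finset.mem_filter.mp hmem
        obtain ⟨he1, he2⟩ := Finset.mem_Icc.mp hicc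
        have hmul : d * d ≤ e * e := by nlinarith
        exact h (le_trans hmul he3)
      rw [hempty]
      simp

-- the even small divisors are exactly the even divisors not exceeding √x
lemma small_even_eq (x : Int) :
    (smallDiv x 1).filter (fun e => e % 2 = 0)
      = (evenDiv x).filter (fun e => e * e ≤ x) := by
  ext e
  simp only [smallDiv, evenDiv, Finset.mem_filter, Finset.mem_Icc]
  tauto

-- pairing bijection: the complements of the qualifying small divisors are exactly the
-- even divisors beyond √x
lemma sum_large (x : Int) (hx : 1 ≤ x) (g : Int → Int) :
    ∑ e ∈ (smallDiv x 1).filter (fun e => x / e ≠ e ∧ (x / e) % 2 = 0), g (x / e)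
      = ∑ e ∈ (evenDiv x).filter (fun e => ¬ e * e ≤ x), g e := by
  refine Finset.sum_nbij' (i := fun e => x / e) (j := fun e => x / e) ?_ ?_ ?_ ?_ ?_
  · intro e he
    obtain ⟨hsm, hne, hev⟩ := Finset.mem_filter.mp he
    obtain ⟨hicc, hsq, hdvd⟩ := Finset.mem_filter.mp hsm
    obtain ⟨he1, hex⟩ := Finset.mem_Icc.mp hicc
    obtain ⟨hq1, hqx, hqdvd, hqe, hqq⟩ := compl_facts x e hx he1 hdvd
    refine Finset.mem_filter.mpr ⟨Finset.mem_filter.mpr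
      ⟨Finset.mem_Icc.mpr ⟨hq1, hqx⟩, hqdvd, hev⟩, ?_⟩
    -- the complement exceeds √x: from e ≤ x/e and e ≠ x/e we get e < x/e, so x < (x/e)²
    have hle : e ≤ x / e := by nlinarith
    have hlt : e < x / e := lt_of_le_of_ne hle (fun hh => hne hh.symm)
    intro hcon
    nlinarith
  · intro e he
    obtain ⟨hmem, hbig⟩ := Finset.mem_filter.mp he
    obtain ⟨hicc, hdvd, hev⟩ := Finset.mem_filter.mp hmem
    obtain ⟨he1, hex⟩ := Finset.mem_Icc.mp hicc
    obtain ⟨hq1, hqx, hqdvd, hqe, hqq⟩ := compl_facts x e hx he1 hdvd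
    have hbig' : x < e * e := by omega
    have hdlt : x / e < e := by nlinarith
    refine Finset.mem_filter.mpr ⟨Finset.mem_filter.mpr
      ⟨Finset.mem_Icc.mpr ⟨hq1, hqx⟩, by nlinarith, hqdvd⟩, ?_, ?_⟩
    · rw [hqq]
      intro heq
      replace heq : e = x / e := heq
      have h5 := hqe
      rw [← heq] at h5
      linarith
    · rw [hqq]; exact hev
  · intro e he
    obtain ⟨hsm, _, _⟩ := Finset.mem_filter.mp he
    obtain ⟨hicc, _, hdvd⟩ := Finset.mem_filter.mp hsm
    obtain ⟨he1, _⟩ := Finset.mem_Icc.mp hicc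
    exact (compl_facts x e hx he1 hdvd).2.2.2.2
  · intro e he
    obtain ⟨hmem, _⟩ := Finset.mem_filter.mp he
    obtain ⟨hicc, hdvd, _⟩ := Finset.mem_filter.mp hmem
    obtain ⟨he1, _⟩ := Finset.mem_Icc.mp hicc
    exact (compl_facts x e hx he1 hdvd).2.2.2.2
  · intro e he
    rfl

-- summed over all small divisors, cnt counts every even divisor exactly once
lemma cnt_total (x : Int) (hx : 1 ≤ x) :
    ∑ e ∈ smallDiv x 1, cnt x e = ((evenDiv x).card : Int) := by
  unfold cnt
  rw [Finset.sum_add_distrib, ← Finset.sum_filter, ← Finset.sum_filter,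
    small_even_eq, sum_large x hx (fun _ => (1 : Int))]
  have h := Finset.filter_card_add_filter_neg_card_eq_card
    (s := evenDiv x) (p := fun e => e * e ≤ x)
  simp only [Finset.sum_const, smul_eq_mul, mul_one]
  rw [← h]
  push_cast
  ring

-- summed over all small divisors, vAl adds up every even divisor exactly once
lemma val_total (x : Int) (hx : 1 ≤ x) :
    ∑ e ∈ smallDiv x 1, vAl x e = (evenDiv x).sum id := by
  unfold vAl
  rw [Finset.sum_add_distrib, ← Finset.sum_filter, ← Finset.sum_filter,
    small_even_eq, sum_large x hx (fun e => e)]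
  rw [← Finset.sum_filter_add_sum_filter_not (evenDiv x) (fun e => e * e ≤ x) id]
  simp [id]

-- ===== VERDICT (by name: the statement is the Claim_ definition above) =====
theorem f_spec : Claim_equal_f := by
  intro x _
  unfold Spec_f f f_alt
  have hB := fAltGo_eq x (x + 1).toNat 1 0 0 le_rfl (by omega)
  by_cases hx : x ≤ 0
  · have hA : PySem.List.pyRange 1 (x + 1) 1 = [] :=
      PySem.List.pyRange_one_eq_nil (by omega)
    have hempty : smallDiv x 1 = ∅ := by
      refine Finset.eq_empty_of_forall_notMem ?_
      intro e hmem
      have h2 := Finset.mem_Icc.mp (Finset.mem_filter.mp hmem).1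
      omega
    rw [hempty] at hB
    simp only [Finset.sum_empty, add_zero] at hB
    simp [hA, hB]
  · push_neg at hx
    have hx1 : 1 ≤ x := hx
    have hk : ((x.toNat : Int)) = x := Int.toNat_of_nonneg (by omega)
    have hA := foldA_eq x x.toNat 0 0
    rw [hk] at hA
    rw [cnt_total x hx1, val_total x hx1] at hB
    simp only [hA, hB, evenDiv]
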